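-- pv_equiv track=rewrite | github.com/MrBrantCode/unitest_baseline | mut_generate/mist_train_taco/taco_14054/solution.py | min_seconds_to_infect_tree
-- ===== SOURCE A (Python) =====
-- from collections import defaultdict
--
-- def min_seconds_to_infect_tree(n, parents):
--     counter = defaultdict(int)
--
--     for parent in parents:
--         counter[parent] += 1
--
--     count = list(counter.values())
--     num_level = len(count)
--     count.sort()
--
--     for i in range(num_level):
--         count[i] = max(count[i] - i - 2, 0)
--
--     L = 0
--     R = max(count)
--
--     if R == 0:
--         return num_level + 1
--
--     def check(k):
--         b = count.copy()
--         for i in range(len(b)):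
--             b[i] = max(b[i] - k, 0)
--         if sum(b) <= k:
--             return True
--         return False
--
--     while R - L > 1:
--         mid = (R + L) // 2
--         if check(mid):
--             R = mid
--         else:
--             L = mid
--
--     return num_level + 1 + R
-- ===== SOURCE B (Python) =====
-- from collections import Counter
--
-- def min_seconds_to_infect_tree(n, parents):
--     count = sorted(Counter(parents).values())
--     m = len(count)
--     vals = [max(c - i - 2, 0) for i, c in enumerate(count)]
--     k = 0
--     while sum(max(v - k, 0) for v in vals) > k:
--         k += 1
--     return m + 1 + k
-- ===== Notes on version B (the rewrite author's own statement) =====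
-- stated objective: simpler
-- what changed: The binary search over k (with its early max==0 return and copy-based check helper) is replaced by a single linear scan that returns num_level+1+k at the first k with sum(max(v-k,0) for v in vals) <= k; the counting/sort/transform preprocessing is kept but written as a comprehension over enumerate instead of an in-place index loop.
-- outside the precondition, e.g. on min_seconds_to_infect_tree(1, []): A raises ValueError, B returns 1
-- crash fix: On parents = [] A raises ValueError (max() of an empty list); B returns 1. — e.g. on min_seconds_to_infect_tree(0, []): A raises ValueError, B returns 1
import Mathlib
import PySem

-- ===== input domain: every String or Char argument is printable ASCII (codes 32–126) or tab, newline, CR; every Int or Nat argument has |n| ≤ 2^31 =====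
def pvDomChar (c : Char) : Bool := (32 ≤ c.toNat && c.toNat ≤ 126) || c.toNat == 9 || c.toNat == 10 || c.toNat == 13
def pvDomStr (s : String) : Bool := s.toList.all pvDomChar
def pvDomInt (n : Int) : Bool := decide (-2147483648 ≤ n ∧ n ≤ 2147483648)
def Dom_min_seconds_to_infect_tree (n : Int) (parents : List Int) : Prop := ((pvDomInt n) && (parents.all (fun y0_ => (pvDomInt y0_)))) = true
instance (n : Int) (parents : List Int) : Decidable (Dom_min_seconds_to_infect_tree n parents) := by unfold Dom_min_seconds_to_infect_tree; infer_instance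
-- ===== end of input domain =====

-- B replaces A's binary search by a linear scan for the least k with f(k) ≤ k (simpler; not faster).

-- ===== PORT A =====
-- check(k): b = count.copy(); for i in range(len(b)): b[i] = max(b[i]-k,0); return sum(b) <= k
def aCheck (count : List Int) (k : Int) : Bool :=
  let b := (PySem.List.pyRange 0 (count.length : Int) 1).foldl
      (fun c i => c.set i.toNat (max (PySem.List.pyGetD c i 0 - k) 0)) count
  decide (b.sum ≤ k)

-- the while-loop of the binary search
def aLoop (count : List Int) (L R : Int) : Int :=
  if h : R - L > 1 then
    -- mid = (R + L) // 2, inlined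
    if aCheck count (PySem.Int.floordiv (R + L) 2) then aLoop count L (PySem.Int.floordiv (R + L) 2)
    else aLoop count (PySem.Int.floordiv (R + L) 2) R
  else R
termination_by (R - L).toNat
decreasing_by
  · have hm : PySem.Int.floordiv (R + L) 2 = (R + L) / 2 :=
      PySem.Int.floordiv_eq_ediv_of_pos (by norm_num)
    simp only [hm]; omega
  · have hm : PySem.Int.floordiv (R + L) 2 = (R + L) / 2 :=
      PySem.Int.floordiv_eq_ediv_of_pos (by norm_num)
    simp only [hm]; omega

def min_seconds_to_infect_tree (n : Int) (parents : List Int) : Int :=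
  let counter := parents.foldl (fun d p => d.modify p 0 (· + 1)) PySem.Dict.empty
  let count0 := counter.values
  let num_level : Int := (count0.length : Int)
  let count1 := PySem.List.sorted count0 (fun x => x) false
  -- for i in range(num_level): count[i] = max(count[i] - i - 2, 0)
  let count := (PySem.List.pyRange 0 num_level 1).foldl
      (fun c i => c.set i.toNat (max (PySem.List.pyGetD c i 0 - i - 2) 0)) count1
  -- R = max(count); Python raises ValueError when count = [] (parents = []): excluded by Pre_
  let R := (PySem.List.max? count (fun x => x)).getD 0
  if R = 0 then num_level + 1
  else num_level + 1 + aLoop count 0 R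

-- ===== PORT B =====
def bF (vals : List Int) (k : Int) : Int := (vals.map (fun v => max (v - k) 0)).sum

-- if k bounds every element (and 0 ≤ k) then f(k) = 0 ≤ k
theorem bF_le_of_forall_le (vals : List Int) (k : Int) (h : ∀ v ∈ vals, v ≤ k)
    (hk : 0 ≤ k) : bF vals k ≤ k := by
  have : (vals.map (fun v => max (v - k) 0)) = vals.map (fun _ => (0 : Int)) := by
    apply List.map_congr_left
    intro v hv
    have := h v hv
    exact max_eq_right (by omega)
  simp only [bF, this, List.map_const', List.sum_replicate, smul_zero]
  exact hk

-- termination helper for the while loop: once k reaches the maximum, f(k) = 0 ≤ k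
theorem bF_le_of_ge_max (vals : List Int) (k : Int) (hk : vals.foldl max 0 ≤ k) :
    bF vals k ≤ k := by
  have h0 : (0 : Int) ≤ vals.foldl max 0 := (PySem.List.le_foldl_max vals 0).1
  exact bF_le_of_forall_le vals k
    (fun v hv => ((PySem.List.le_foldl_max vals 0).2 v hv).trans hk) (h0.trans hk)

-- while sum(max(v-k,0) for v in vals) > k: k += 1; return k  (k stays a natural number)
def bLoop (vals : List Int) (k : Nat) : Int :=
  if bF vals (k : Int) ≤ (k : Int) then (k : Int) else bLoop vals (k + 1)
termination_by ((vals.foldl max 0).toNat + 1 - k)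
decreasing_by
  rename_i hnot
  have : ¬ vals.foldl max 0 ≤ (k : Int) := fun hle => hnot (bF_le_of_ge_max vals _ hle)
  omega

def min_seconds_to_infect_tree_alt (n : Int) (parents : List Int) : Int :=
  let count := PySem.List.sorted (PySem.Dict.counter parents).values (fun x => x) false
  let m : Int := (count.length : Int)
  let vals := (PySem.List.enumerate count 0).map (fun p => max (p.2 - p.1 - 2) 0)
  m + 1 + bLoop vals 0

-- ===== PRECONDITION & SPEC =====
-- Pre_ excludes only parents = [], where A's max([]) raises ValueError.
def Pre_min_seconds_to_infect_tree (n : Int) (parents : List Int) : Prop := parents ≠ []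
instance (n : Int) (parents : List Int) : Decidable (Pre_min_seconds_to_infect_tree n parents) := by
  unfold Pre_min_seconds_to_infect_tree; infer_instance

def pvWitness_min_seconds_to_infect_tree : Int × List Int := (3, [0, 0, 1])

-- On parents = [] the Python A raises ValueError (max of empty list); B returns len+1 = 1.
def Raises_min_seconds_to_infect_tree (n : Int) (parents : List Int) : Prop := parents = []
instance (n : Int) (parents : List Int) : Decidable (Raises_min_seconds_to_infect_tree n parents) := by
  unfold Raises_min_seconds_to_infect_tree; infer_instance
def pvRaiseWitness_min_seconds_to_infect_tree : Int × List Int := (0, [])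
def pvRaiseWitnessOut_min_seconds_to_infect_tree : Int := 1

def Spec_min_seconds_to_infect_tree (n : Int) (parents : List Int) (out : Int) : Prop := out = min_seconds_to_infect_tree_alt n parents
instance (n : Int) (parents : List Int) (out : Int) : Decidable (Spec_min_seconds_to_infect_tree n parents out) := by unfold Spec_min_seconds_to_infect_tree; infer_instance

-- ===== CLAIM (what is proved, stated in full; the proofs are below) =====
def Claim_equal_min_seconds_to_infect_tree : Prop := ∀ (n : Int) (parents : List Int), Dom_min_seconds_to_infect_tree n parents → Pre_min_seconds_to_infect_tree n parents → Spec_min_seconds_to_infect_tree n parents (min_seconds_to_infect_tree n parents)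
def Claim_raises_min_seconds_to_infect_tree : Prop := (∀ (n : Int) (parents : List Int), Dom_min_seconds_to_infect_tree n parents → Raises_min_seconds_to_infect_tree n parents → ¬ Pre_min_seconds_to_infect_tree n parents) ∧ (Dom_min_seconds_to_infect_tree (pvRaiseWitness_min_seconds_to_infect_tree.1) (pvRaiseWitness_min_seconds_to_infect_tree.2) ∧ Raises_min_seconds_to_infect_tree (pvRaiseWitness_min_seconds_to_infect_tree.1) (pvRaiseWitness_min_seconds_to_infect_tree.2) ∧ min_seconds_to_infect_tree_alt (pvRaiseWitness_min_seconds_to_infect_tree.1) (pvRaiseWitness_min_seconds_to_infect_tree.2) = pvRaiseWitnessOut_min_seconds_to_infect_tree)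

-- ===== LEMMAS AND PROOFS =====

-- the in-place "for i in range(len(l)): l[i] = f(i, l[i])" loop is the map over enumerate
theorem foldl_set_eq_enum_map (f : Int → Int → Int) :
    ∀ (rest done : List Int),
    (PySem.List.pyRange (done.length : Int) ((done.length : Int) + (rest.length : Int)) 1).foldl
        (fun c i => c.set i.toNat (f i (PySem.List.pyGetD c i 0))) (done ++ rest)
      = done ++ (PySem.List.enumerate rest (done.length : Int)).map (fun p => f p.1 p.2) := by
  intro rest
  induction rest with
  | nil =>
    intro done
    rw [PySem.List.pyRange_one_eq_nil (by simp)]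
    simp [PySem.List.enumerate_nil]
  | cons v rest ih =>
    intro done
    have hs : (done.length : Int) < (done.length : Int) + ((v :: rest).length : Int) := by
      simp only [List.length_cons]; push_cast; omega
    rw [PySem.List.pyRange_one_cons hs, List.foldl_cons]
    have hget : PySem.List.pyGetD (done ++ v :: rest) (done.length : Int) 0 = v := by
      rw [PySem.List.pyGetD_natCast]
      rw [List.getD_append_right done (v :: rest) 0 done.length (le_refl _)]
      simp
    have hset : (done ++ v :: rest).set ((done.length : Int)).toNat (f (done.length : Int) v)
        = (done ++ [f (done.length : Int) v]) ++ rest := by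
      rw [Int.toNat_natCast, List.set_append_right _ _ (le_refl _)]
      simp
    rw [hget, hset]
    have hlen : ((done ++ [f (done.length : Int) v]).length : Int) = (done.length : Int) + 1 := by
      simp
    have hup : (done.length : Int) + ((v :: rest).length : Int)
        = ((done ++ [f (done.length : Int) v]).length : Int) + (rest.length : Int) := by
      simp only [List.length_cons, List.length_append, List.length_cons, List.length_nil]
      push_cast; ring
    calc (PySem.List.pyRange ((done.length : Int) + 1)
            ((done.length : Int) + ((v :: rest).length : Int)) 1).foldl
            (fun c i => c.set i.toNat (f i (PySem.List.pyGetD c i 0)))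
            ((done ++ [f (done.length : Int) v]) ++ rest)
        = (PySem.List.pyRange (((done ++ [f (done.length : Int) v]).length : Int))
            (((done ++ [f (done.length : Int) v]).length : Int) + (rest.length : Int)) 1).foldl
            (fun c i => c.set i.toNat (f i (PySem.List.pyGetD c i 0)))
            ((done ++ [f (done.length : Int) v]) ++ rest) := by rw [hlen, hup, hlen]
      _ = (done ++ [f (done.length : Int) v])
            ++ (PySem.List.enumerate rest (((done ++ [f (done.length : Int) v]).length : Int))).map
                (fun p => f p.1 p.2) := ih _
      _ = done ++ (PySem.List.enumerate (v :: rest) (done.length : Int)).map (fun p => f p.1 p.2) := by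
          rw [hlen, PySem.List.enumerate_cons]
          simp

theorem transform_eq (l : List Int) (f : Int → Int → Int) :
    (PySem.List.pyRange 0 (l.length : Int) 1).foldl
        (fun c i => c.set i.toNat (f i (PySem.List.pyGetD c i 0))) l
      = (PySem.List.enumerate l 0).map (fun p => f p.1 p.2) := by
  have h := foldl_set_eq_enum_map f l []
  simpa using h

theorem aCheck_iff (vals : List Int) (k : Int) : aCheck vals k = true ↔ bF vals k ≤ k := by
  have h := transform_eq vals (fun _ v => max (v - k) 0)
  have h2 : (PySem.List.enumerate vals 0).map (fun p => max (p.2 - k) 0)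
      = vals.map (fun v => max (v - k) 0) := by
    conv_rhs => rw [← PySem.List.map_snd_enumerate vals 0]
    rw [List.map_map]
    rfl
  simp only [aCheck, bF, h, h2, decide_eq_true_eq]

theorem bF_anti (vals : List Int) {k k' : Int} (h : k ≤ k') : bF vals k' ≤ bF vals k := by
  apply List.sum_le_sum
  intro v hv
  simp only [le_sup_iff, sup_le_iff]
  omega

-- the binary search lands on the boundary: check(r) ∧ ¬check(r-1)
theorem aLoop_spec (vals : List Int) :
    ∀ (fuel : Nat) (L R : Int), (R - L).toNat ≤ fuel →
      ¬ bF vals L ≤ L → bF vals R ≤ R → L < R →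
      (bF vals (aLoop vals L R) ≤ aLoop vals L R ∧
       ¬ bF vals (aLoop vals L R - 1) ≤ aLoop vals L R - 1 ∧
       L < aLoop vals L R ∧ aLoop vals L R ≤ R) := by
  intro fuel
  induction fuel with
  | zero => intro L R hf _ _ hLR; omega
  | succ m ih =>
    intro L R hf hL hR hLR
    rw [aLoop]
    by_cases hgt : R - L > 1
    · simp only [hgt, dif_pos]
      have hm : PySem.Int.floordiv (R + L) 2 = (R + L) / 2 :=
        PySem.Int.floordiv_eq_ediv_of_pos (by norm_num)
      set mid := PySem.Int.floordiv (R + L) 2 with hmid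
      have hb : L < mid ∧ mid < R := by rw [hm]; omega
      by_cases hc : aCheck vals mid = true
      · simp only [hc, if_true]
        have := ih L mid (by omega) hL ((aCheck_iff vals mid).mp hc) hb.1
        exact ⟨this.1, this.2.1, this.2.2.1, le_trans this.2.2.2 (le_of_lt hb.2)⟩
      · simp only [hc]
        have hnc : ¬ bF vals mid ≤ mid := fun h => hc ((aCheck_iff vals mid).mpr h)
        have := ih mid R (by omega) hnc hR hb.2
        exact ⟨this.1, this.2.1, lt_trans hb.1 this.2.2.1, this.2.2.2⟩
    · simp only [hgt, dif_neg, not_false_iff]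
      have hR1 : R = L + 1 := by omega
      refine ⟨hR, ?_, by omega, le_refl _⟩
      rw [hR1]; simpa using hL

-- the linear scan reaches exactly that boundary
theorem bLoop_eq (vals : List Int) (r : Int)
    (hP : bF vals r ≤ r)
    (hnP : ∀ j : Int, 0 ≤ j → j < r → ¬ bF vals j ≤ j) :
    ∀ (fuel : Nat) (k : Nat), (r - k).toNat ≤ fuel → (k : Int) ≤ r →
      bLoop vals k = r := by
  intro fuel
  induction fuel with
  | zero =>
    intro k hf hk
    have hkr : (k : Int) = r := by omega
    rw [bLoop, if_pos (hkr ▸ hP)]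
    exact hkr
  | succ m ih =>
    intro k hf hk
    rw [bLoop]
    by_cases hc : bF vals (k : Int) ≤ (k : Int)
    · rw [if_pos hc]
      by_contra hne
      exact hnP k (Int.natCast_nonneg k) (lt_of_le_of_ne hk hne) hc
    · rw [if_neg hc]
      have hkr : (k : Int) < r := lt_of_le_of_ne hk (fun h => hc (h ▸ hP))
      exact ih (k + 1) (by omega) (by push_cast; omega)

theorem min_seconds_to_infect_tree_spec : Claim_equal_min_seconds_to_infect_tree := by
  intro n parents _ hpre
  unfold Spec_min_seconds_to_infect_tree min_seconds_to_infect_tree min_seconds_to_infect_tree_alt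
  dsimp only
  have hcv : parents.foldl (fun d p => d.modify p 0 (· + 1)) PySem.Dict.empty
      = PySem.Dict.counter parents := (PySem.Dict.counter_eq_foldl parents).symm
  rw [hcv]
  set values := (PySem.Dict.counter parents).values with hv
  set count1 := PySem.List.sorted values (fun x => x) false with hc1
  have hlen : (values.length : Int) = (count1.length : Int) := by
    rw [hc1, PySem.List.length_sorted]
  rw [hlen, transform_eq count1 (fun i v => max (v - i - 2) 0)]
  set vals := (PySem.List.enumerate count1 0).map (fun p => max (p.2 - p.1 - 2) 0) with hvals
  -- the lists are nonempty (parents ≠ [])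
  have hcne : count1 ≠ [] := by
    rw [hc1, Ne, PySem.List.sorted_eq_nil_iff, hv]
    intro hnil
    obtain ⟨p, ps, rfl⟩ := List.exists_cons_of_ne_nil hpre
    have hmem : p ∈ PySem.Set.ofList (p :: ps) := (PySem.Set.mem_ofList _ _).mpr List.mem_cons_self
    have := List.ne_nil_of_mem hmem
    have hitems : (PySem.Dict.counter (p :: ps)).items
        = (PySem.Set.ofList (p :: ps)).map (fun k => (k, ((p :: ps).count k : Int))) :=
      PySem.Dict.items_counter (p :: ps)
    have : (PySem.Dict.counter (p :: ps)).values ≠ [] := by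
      simp only [PySem.Dict.values, hitems]
      simpa using this
    exact this hnil
  have hvne : vals ≠ [] := by
    rw [hvals, Ne, List.map_eq_nil_iff]
    intro h
    have := congrArg List.length h
    rw [PySem.List.length_enumerate] at this
    exact hcne (List.eq_nil_of_length_eq_zero this)
  have hnn : ∀ v ∈ vals, 0 ≤ v := by
    intro v hv'
    rw [hvals] at hv'
    obtain ⟨p, _, rfl⟩ := List.mem_map.mp hv'
    exact le_max_right _ _
  obtain ⟨R0, hR0⟩ : ∃ m, PySem.List.max? vals (fun x => x) = some m := by
    cases h : PySem.List.max? vals (fun x => x) with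
    | none => exact absurd ((PySem.List.max?_eq_none_iff _ _).mp h) hvne
    | some m => exact ⟨m, rfl⟩
  have hmem : R0 ∈ vals := PySem.List.max?_mem hR0
  have hmax : ∀ y ∈ vals, y ≤ R0 := PySem.List.max?_isMax hR0
  have hR0nn : (0 : Int) ≤ R0 := hnn _ hmem
  rw [hR0]
  simp only [Option.getD_some]
  by_cases hz : R0 = 0
  · rw [if_pos hz]
    have hb0 : bLoop vals 0 = 0 := by
      rw [bLoop, if_pos]
      · rfl
      · exact_mod_cast bF_le_of_forall_le vals 0 (fun v hv' => hz ▸ hmax v hv') le_rfl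
    rw [hb0]
    ring
  · rw [if_neg hz]
    have hR0pos : (0 : Int) < R0 := lt_of_le_of_ne hR0nn (Ne.symm hz)
    have hPR0 : bF vals R0 ≤ R0 := bF_le_of_forall_le vals R0 hmax hR0nn
    have hnP0 : ¬ bF vals 0 ≤ 0 := by
      have hid : vals.map (fun v => max (v - 0) 0) = vals := by
        conv_rhs => rw [← List.map_id vals]
        exact List.map_congr_left (fun v hv' => by
          have := hnn v hv'; simp only [Int.sub_zero, id]; exact max_eq_left this)
      have hsum : R0 ≤ vals.sum := List.single_le_sum hnn R0 hmem
      unfold bF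
      rw [hid]
      omega
    have hspec := aLoop_spec vals R0.toNat 0 R0 (by omega) hnP0 hPR0 hR0pos
    set r := aLoop vals 0 R0 with hr
    have hnPj : ∀ j : Int, 0 ≤ j → j < r → ¬ bF vals j ≤ j := by
      intro j hj hjr hPj
      have hmono : bF vals (r - 1) ≤ bF vals j := bF_anti vals (by omega)
      exact hspec.2.1 (le_trans hmono (le_trans hPj (by omega)))
    have hbl : bLoop vals 0 = r :=
      bLoop_eq vals r hspec.1 hnPj r.toNat 0 (by omega) (by push_cast; omega)
    rw [hbl]

theorem alt_at_raise_witness : min_seconds_to_infect_tree_alt 0 [] = 1 := by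
  show (0 : Int) + 1 + bLoop [] 0 = 1
  rw [bLoop]
  norm_num [bF]

def min_seconds_to_infect_tree_raises : Claim_raises_min_seconds_to_infect_tree := by
  unfold Claim_raises_min_seconds_to_infect_tree
  exact ⟨fun n parents _ hr hp => hp hr, by decide, by decide, alt_at_raise_witness⟩
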